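-- pv_equiv track=rewrite | github.com/mikiva/adventofcode20 | day09/day09.py | try_weakness
-- ===== SOURCE A (Python) =====
-- def try_weakness(pre, check):
--     weaklist = []
--
--     for p in pre:
--         weaklist.append(p)
--         if sum(weaklist) == check:
--             return True,  weaklist
--         elif sum(weaklist) > check:
--             break
--     return False, weaklist
-- ===== SOURCE B (Python) =====
-- def try_weakness(pre, check):
--     # Stage 1: one pass building the list of prefix sums.
--     sums = []
--     t = 0
--     for p in pre:
--         t += p
--         sums.append(t)
--     # Stage 2: first index whose prefix sum reaches check.
--     k = next((j for j, s in enumerate(sums) if s >= check), None)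
--     if k is None:
--         return False, list(pre)
--     return sums[k] == check, pre[:k + 1]
-- ===== Notes on version B (the rewrite author's own statement) =====
-- stated objective: faster
-- what changed: B works in two staged passes over an index structure: it builds the prefix-sum list once, then searches for the first index whose prefix sum reaches check and slices pre there, instead of A's single loop that re-sums a growing accumulator list on every iteration.
import Mathlib
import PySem

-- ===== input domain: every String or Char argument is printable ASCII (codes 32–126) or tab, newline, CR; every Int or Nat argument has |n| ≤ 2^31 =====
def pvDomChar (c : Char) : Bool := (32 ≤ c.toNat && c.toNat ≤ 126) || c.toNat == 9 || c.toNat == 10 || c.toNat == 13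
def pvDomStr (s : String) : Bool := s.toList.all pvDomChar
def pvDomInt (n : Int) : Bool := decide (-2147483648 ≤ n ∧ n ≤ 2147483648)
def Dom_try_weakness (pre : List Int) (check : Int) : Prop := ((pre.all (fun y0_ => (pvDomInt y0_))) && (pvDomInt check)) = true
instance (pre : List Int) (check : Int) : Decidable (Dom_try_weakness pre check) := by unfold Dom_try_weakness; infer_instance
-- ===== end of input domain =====

-- B builds the prefix-sum list once and then searches for the first index reaching check (faster: O(n) vs A's O(n^2) re-summing).


-- ===== PORT A =====
-- loop over pre, appending to weaklist and re-summing it each iteration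
def tryWeaknessLoopA (check : Int) (rest : List Int) (weaklist : List Int) : Bool × List Int :=
  match rest with
  | [] => (false, weaklist)
  | p :: t =>
    let w := weaklist ++ [p]
    if w.sum = check then (true, w)
    else if w.sum > check then (false, w)
    else tryWeaknessLoopA check t w

def try_weakness (pre : List Int) (check : Int) : Bool × List Int :=
  tryWeaknessLoopA check pre []

-- ===== PORT B =====
-- stage 1 of Source B: the loop `t += p; sums.append(t)` as a fold over (sums, t)
def pvPrefixSums (pre : List Int) : List Int :=
  (pre.foldl (fun (st : List Int × Int) p => (st.1 ++ [st.2 + p], st.2 + p)) ([], 0)).1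

-- stage 2 of Source B: `next((j for j, s in enumerate(sums) if s >= check), None)`
def pvFirstGe (check : Int) (sums : List Int) (j : Nat) : Option Nat :=
  match sums with
  | [] => none
  | s :: r => if s ≥ check then some j else pvFirstGe check r (j + 1)

def try_weakness_alt (pre : List Int) (check : Int) : Bool × List Int :=
  let sums := pvPrefixSums pre
  match pvFirstGe check sums 0 with
  | none => (false, pre)
  | some k => (decide (sums.getD k 0 = check), pre.take (k + 1))

-- ===== PRECONDITION & SPEC =====
def Spec_try_weakness (pre : List Int) (check : Int) (out : Bool × List Int) : Prop := out = try_weakness_alt pre check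
instance (pre : List Int) (check : Int) (out : Bool × List Int) : Decidable (Spec_try_weakness pre check out) := by unfold Spec_try_weakness; infer_instance

-- ===== CLAIM (what is proved, stated in full; the proofs are below) =====
def Claim_equal_try_weakness : Prop := ∀ (pre : List Int) (check : Int), Dom_try_weakness pre check → Spec_try_weakness pre check (try_weakness pre check)

-- ===== LEMMAS AND PROOFS =====

-- recursive form of the prefix sums of `rest` starting from running total t
def pvPs (t : Int) : List Int → List Int
  | [] => []
  | p :: r => (t + p) :: pvPs (t + p) r

theorem pvPrefixSums_fold (rest : List Int) : ∀ (acc : List Int) (t : Int),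
    (rest.foldl (fun (st : List Int × Int) p => (st.1 ++ [st.2 + p], st.2 + p)) (acc, t)).1
      = acc ++ pvPs t rest := by
  induction rest with
  | nil => intro acc t; simp [pvPs]
  | cons p r ih =>
    intro acc t
    simp only [List.foldl_cons, pvPs]
    rw [ih]
    simp

theorem pvFirstGe_shift (check : Int) (xs : List Int) : ∀ j : Nat,
    pvFirstGe check xs (j + 1) = Option.map (· + 1) (pvFirstGe check xs j) := by
  induction xs with
  | nil => intro j; simp [pvFirstGe]
  | cons s r ih =>
    intro j
    by_cases h : s ≥ check <;> simp [pvFirstGe, h, ih]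

-- A's loop, characterised by B's two stages over the remaining input
theorem loopA_char (check : Int) : ∀ (rest w : List Int),
    tryWeaknessLoopA check rest w =
      (match pvFirstGe check (pvPs w.sum rest) 0 with
      | none => (false, w ++ rest)
      | some k => (decide ((pvPs w.sum rest).getD k 0 = check), w ++ rest.take (k + 1))) := by
  intro rest
  induction rest with
  | nil => intro w; simp [tryWeaknessLoopA, pvPs, pvFirstGe]
  | cons p r ih =>
    intro w
    simp only [tryWeaknessLoopA, pvPs]
    by_cases h1 : w.sum + p = check
    · have hsum : (w ++ [p]).sum = check := by simp [List.sum_append, h1]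
      simp [pvFirstGe, hsum, h1, List.take]
    · have hsum : (w ++ [p]).sum = w.sum + p := by simp [List.sum_append]
      by_cases h2 : w.sum + p > check
      · have hge : check ≤ w.sum + p := le_of_lt h2
        simp [pvFirstGe, hsum, h1, h2, hge, List.take]
      · have hlt : ¬ check ≤ w.sum + p := by omega
        rw [if_neg (by rw [hsum]; exact h1), if_neg (by rw [hsum]; omega)]
        rw [ih (w ++ [p])]
        simp only [pvFirstGe, if_neg hlt, hsum]
        rw [pvFirstGe_shift]
        cases hfg : pvFirstGe check (pvPs (w.sum + p) r) 0 with
        | none => simp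
        | some k =>
          simp only [Option.map_some]
          simp [List.getD, List.take, List.append_assoc]

-- ===== VERDICT (by name: the statement is the Claim_ definition above) =====
theorem try_weakness_spec : Claim_equal_try_weakness := by
  intro pre check _
  unfold Spec_try_weakness try_weakness try_weakness_alt
  have hps : pvPrefixSums pre = pvPs 0 pre := by
    simpa using pvPrefixSums_fold pre [] 0
  have := loopA_char check pre []
  simp only [List.sum_nil, List.nil_append] at this
  rw [this, hps]
  rfl
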